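-- pv_equiv track=rewrite | github.com/Sanpa33/Introduccion-a-la-programacion | Practicas/Practica7/Practica7.py | filas_ordenadas
-- ===== SOURCE A (Python) =====
-- def ordenados(s:list[int]) -> bool:
--
--     for i in range( len(s) -1 ):
--          if (s[i] > s[i+1]):
--              return False
--
--     return True
--
-- def filas_ordenadas(s:list[int])->list[bool]:
--
--     res:list[bool] = []
--
--     for fila in s:
--         if(ordenados(fila)):
--             res.append(True)
--         else:
--             res.append(False)
--
--     return res
-- ===== SOURCE B (Python) =====
-- def filas_ordenadas(s: list[int]) -> list[bool]:
--     return [fila == sorted(fila) for fila in s]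
-- ===== Notes on version B (the rewrite author's own statement) =====
-- stated objective: idiomatic
-- what changed: Each row is judged by comparing it with its own sorted copy in a single comprehension, instead of an index loop over adjacent pairs with an early return inside a helper.
import Mathlib
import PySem

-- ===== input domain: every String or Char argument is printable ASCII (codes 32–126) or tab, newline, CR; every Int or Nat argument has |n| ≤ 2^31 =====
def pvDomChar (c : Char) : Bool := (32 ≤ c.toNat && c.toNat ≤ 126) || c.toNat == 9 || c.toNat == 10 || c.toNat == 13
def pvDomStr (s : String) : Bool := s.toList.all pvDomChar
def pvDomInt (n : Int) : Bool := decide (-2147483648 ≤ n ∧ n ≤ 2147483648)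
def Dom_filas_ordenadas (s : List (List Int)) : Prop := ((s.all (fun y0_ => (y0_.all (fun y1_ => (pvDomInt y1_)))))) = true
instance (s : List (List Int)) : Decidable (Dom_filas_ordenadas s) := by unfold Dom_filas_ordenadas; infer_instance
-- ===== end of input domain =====

-- B replaces A's adjacent-pair scan with 'row equals its sorted copy'; objective: idiomatic, same results.

-- ===== PORT A =====
-- A's helper 'ordenados': scan adjacent pairs, early return False on a descent.
def ordenados : List Int → Bool
  | a :: b :: t => if a > b then false else ordenados (b :: t)
  | _ => true

def filas_ordenadas (s : List (List Int)) : List Bool :=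
  s.foldl (fun res fila => res ++ [if ordenados fila then true else false]) []

-- ===== PORT B =====
def filas_ordenadas_alt (s : List (List Int)) : List Bool :=
  s.map (fun fila => decide (fila = PySem.List.sorted fila (fun x => x) false))

-- ===== PRECONDITION & SPEC =====
def Spec_filas_ordenadas (s : List (List Int)) (out : List Bool) : Prop := out = filas_ordenadas_alt s
instance (s : List (List Int)) (out : List Bool) : Decidable (Spec_filas_ordenadas s out) := by unfold Spec_filas_ordenadas; infer_instance

-- ===== CLAIM (what is proved, stated in full; the proofs are below) =====
def Claim_equal_filas_ordenadas : Prop := ∀ (s : List (List Int)), Dom_filas_ordenadas s → Spec_filas_ordenadas s (filas_ordenadas s)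

-- ===== LEMMAS AND PROOFS =====
theorem ordenados_iff_chain (l : List Int) : ordenados l = true ↔ l.IsChain (· ≤ ·) := by
  induction l with
  | nil => simp [ordenados]
  | cons a t ih =>
    cases t with
    | nil => simp [ordenados]
    | cons b t' =>
      simp only [ordenados, List.isChain_cons_cons]
      constructor
      · intro h
        split at h
        · exact absurd h (by simp)
        · exact ⟨by omega, ih.mp h⟩
      · rintro ⟨hab, hc⟩
        rw [if_neg (by omega)]
        exact ih.mpr hc

theorem ordenados_eq_beq_sorted (l : List Int) :
    ordenados l = decide (l = PySem.List.sorted l (fun x => x) false) := by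
  by_cases h : l.Pairwise (· ≤ ·)
  · rw [(ordenados_iff_chain l).mpr (List.isChain_iff_pairwise.mpr h)]
    rw [PySem.List.sorted_eq_self_of_pairwise l (fun x => x) h]
    simp
  · have h1 : ordenados l = false := by
      rcases Bool.eq_false_or_eq_true (ordenados l) with h1 | h1
      · exact absurd (List.isChain_iff_pairwise.mp ((ordenados_iff_chain l).mp h1)) h
      · exact h1
    rw [h1]
    have hne : l ≠ PySem.List.sorted l (fun x => x) false := by
      intro he
      exact h (he ▸ PySem.List.sorted_pairwise l (fun x => x))
    simp [hne]

theorem foldl_acc (s : List (List Int)) (acc : List Bool) :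
    s.foldl (fun res fila => res ++ [if ordenados fila then true else false]) acc
      = acc ++ s.map (fun fila => decide (fila = PySem.List.sorted fila (fun x => x) false)) := by
  induction s generalizing acc with
  | nil => simp
  | cons h t ih =>
    simp only [List.foldl_cons, List.map_cons, ih]
    rw [ordenados_eq_beq_sorted]
    simp [List.append_assoc]

-- ===== VERDICT (by name: the statement is the Claim_ definition above) =====
theorem filas_ordenadas_spec : Claim_equal_filas_ordenadas := by
  intro s _
  unfold Spec_filas_ordenadas filas_ordenadas filas_ordenadas_alt
  simpa using foldl_acc s []
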